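-- pv_equiv track=rewrite | github.com/BeomSeokYu/Algorithm | Programmers/Basic/진료순서_정하기.py | solution
-- ===== SOURCE A (Python) =====
-- def solution(emergency):
--     answer = []
--     sorted_emer = sorted(emergency, reverse=True)
--     pri_dict = {}
--     for i in range(len(sorted_emer)):
--         pri_dict[sorted_emer[i]] = i + 1
--     for i in emergency:
--         answer.append(pri_dict[i])
--     return answer
-- ===== SOURCE B (Python) =====
-- def solution(emergency):
--     return [sum(1 for y in emergency if y >= x) for x in emergency]
-- ===== Notes on version B (the rewrite author's own statement) =====
-- stated objective: simpler
-- what changed: Replaces the descending sort plus value-to-rank dict with a direct per-element count of values >= x, maintaining no auxiliary structure.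
import Mathlib
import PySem

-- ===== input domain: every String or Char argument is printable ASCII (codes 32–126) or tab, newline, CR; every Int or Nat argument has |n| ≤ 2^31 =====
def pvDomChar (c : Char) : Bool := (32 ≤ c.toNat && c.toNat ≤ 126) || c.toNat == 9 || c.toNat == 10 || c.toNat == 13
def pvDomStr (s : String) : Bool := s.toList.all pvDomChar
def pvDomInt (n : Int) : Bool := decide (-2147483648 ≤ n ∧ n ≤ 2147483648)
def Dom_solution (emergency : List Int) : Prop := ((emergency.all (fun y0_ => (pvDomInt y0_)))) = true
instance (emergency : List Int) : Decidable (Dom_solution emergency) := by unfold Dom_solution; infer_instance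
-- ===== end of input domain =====

-- B replaces A's descending sort + value→rank dict by directly counting, for each x, the
-- elements ≥ x (simpler: no auxiliary structure, not faster).

-- ===== PORT A =====
-- pri_dict[i] in A can never raise KeyError (every i of emergency is a key of pri_dict),
-- so the lookup is ported as getD with an arbitrary default 0; likewise sorted_emer[i]
-- is always in range, so pyGetD's default 0 is never used.
def solution (emergency : List Int) : List Int :=
  let sorted_emer := PySem.List.sorted emergency (fun x => x) true
  let pri_dict :=
    (PySem.List.pyRange 0 sorted_emer.length 1).foldl
      (fun d i => d.insert (PySem.List.pyGetD sorted_emer i 0) (i + 1))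
      (PySem.Dict.empty : PySem.Dict Int Int)
  emergency.foldl (fun answer i => answer ++ [pri_dict.getD i 0]) []

-- ===== PORT B =====
def solution_alt (emergency : List Int) : List Int :=
  emergency.map (fun x => ((emergency.countP (fun y => decide (x ≤ y)) : Nat) : Int))

-- ===== PRECONDITION & SPEC =====
def Spec_solution (emergency : List Int) (out : List Int) : Prop := out = solution_alt emergency
instance (emergency : List Int) (out : List Int) : Decidable (Spec_solution emergency out) := by unfold Spec_solution; infer_instance

-- ===== CLAIM (what is proved, stated in full; the proofs are below) =====
def Claim_equal_solution : Prop := ∀ (emergency : List Int), Dom_solution emergency → Spec_solution emergency (solution emergency)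

-- ===== LEMMAS AND PROOFS =====

-- A's dict-building loop, restated structurally: insert the elements of s in order,
-- with values c+1, c+2, …
def buildDict : List Int → Int → PySem.Dict Int Int → PySem.Dict Int Int
  | [], _, d => d
  | a :: t, c, d => buildDict t (c + 1) (d.insert a (c + 1))

theorem buildDict_getD_not_mem (t : List Int) (x : Int) (hx : x ∉ t) :
    ∀ (c : Int) (d : PySem.Dict Int Int), (buildDict t c d).getD x 0 = d.getD x 0 := by
  induction t with
  | nil => intro c d; rfl
  | cons a t ih =>
    intro c d
    simp only [List.mem_cons, not_or] at hx
    rw [buildDict, ih hx.2, PySem.Dict.getD_insert_of_ne _ _ _ hx.1]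

theorem buildDict_getD_mem (t : List Int) (hdesc : t.Pairwise (fun a b => b ≤ a))
    (x : Int) (hx : x ∈ t) :
    ∀ (c : Int) (d : PySem.Dict Int Int),
      (buildDict t c d).getD x 0 = c + ((t.countP (fun y => decide (x ≤ y)) : Nat) : Int) := by
  induction t with
  | nil => cases hx
  | cons a t ih =>
    intro c d
    rw [List.pairwise_cons] at hdesc
    by_cases hxt : x ∈ t
    · have hxa : x ≤ a := hdesc.1 x hxt
      rw [buildDict, ih hdesc.2 hxt]
      rw [List.countP_cons]
      simp [hxa]
      ring
    · have hxa : x = a := by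
        rcases List.mem_cons.mp hx with h | h
        · exact h
        · exact absurd h hxt
      subst hxa
      rw [buildDict, buildDict_getD_not_mem t x hxt, PySem.Dict.getD_insert_self]
      have hc0 : t.countP (fun y => decide (x ≤ y)) = 0 := by
        rw [List.countP_eq_zero]
        intro y hy
        have h1 : y ≤ x := hdesc.1 y hy
        have h2 : y ≠ x := fun h => hxt (h ▸ hy)
        simp only [decide_eq_true_eq]
        omega
      rw [List.countP_cons]
      simp [hc0]

-- Bridging A's index loop over range(len(s)) to the structural buildDict.
theorem foldl_pyRange_eq_buildDict (pre s : List Int) :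
    ∀ (d : PySem.Dict Int Int),
      (PySem.List.pyRange (pre.length : Int) ((pre ++ s).length : Int) 1).foldl
        (fun d i => d.insert (PySem.List.pyGet? (pre ++ s) i |>.getD 0) (i + 1)) d
      = buildDict s (pre.length : Int) d := by
  induction s generalizing pre with
  | nil => intro d; simp [PySem.List.pyRange, buildDict]
  | cons a t ih =>
    intro d
    have hlt : (pre.length : Int) < ((pre ++ a :: t).length : Int) := by
      simp
    rw [PySem.List.pyRange_one_cons hlt, List.foldl_cons]
    have hget : PySem.List.pyGet? (pre ++ a :: t) (pre.length : Int) = some a := by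
      have h1 : (pre ++ a :: t)[pre.length]? = some a := by
        simp
      rw [PySem.List.pyGet?_natCast]
      exact h1
    rw [hget]
    simp only [Option.getD_some]
    have := ih (pre ++ [a]) (d.insert a ((pre.length : Int) + 1))
    simp only [List.append_assoc, List.singleton_append, List.length_append,
      List.length_singleton] at this ⊢
    rw [show ((pre.length + 1 : Nat) : Int) = (pre.length : Int) + 1 by push_cast; ring] at this
    rw [this, buildDict]

-- ===== VERDICT (by name: the statement is the Claim_ definition above) =====
theorem solution_spec : Claim_equal_solution := by
  intro emergency _
  unfold Spec_solution solution solution_alt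
  rw [PySem.List.foldl_append_singleton_eq_map]
  apply List.map_congr_left
  intro x hx
  set s := PySem.List.sorted emergency (fun x => x) true with hs
  have hperm : s.Perm emergency := PySem.List.sorted_perm emergency (fun x => x) true
  have hbridge := foldl_pyRange_eq_buildDict [] s
  simp only [List.nil_append, List.length_nil, Nat.cast_zero] at hbridge
  have hxs : x ∈ s := hperm.mem_iff.mpr hx
  have hdesc : s.Pairwise (fun a b => b ≤ a) :=
    PySem.List.sorted_pairwise_rev emergency (fun x => x)
  have hgetd : PySem.List.pyGetD = fun (l : List Int) i d => (PySem.List.pyGet? l i).getD d := by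
    funext l i d; simp [PySem.List.pyGetD]
  rw [hgetd, hbridge, buildDict_getD_mem s hdesc x hxs 0 PySem.Dict.empty,
    hperm.countP_eq]
  ring
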